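-- pv_equiv track=rewrite | github.com/ns-krishnakodali/q-file-share | q-file-share-server/app/quantum_protocols/Untitled-1.py | reduce_polynomial
-- ===== SOURCE A (Python) =====
-- def reduce_polynomial(polynomial):
--     N = 4
--     reduced_poly = [0] * N
--     degree = len(polynomial) - 1
--
--     for i, coeff in enumerate(polynomial):
--         index = (degree - i) % N
--         if ((degree - i) // N) % 2 == 0:
--             reduced_poly[index] += coeff
--         else:
--             reduced_poly[index] -= coeff
--
--     return reduced_poly[::-1]
-- ===== SOURCE B (Python) =====
-- def reduce_polynomial(polynomial):
--     degree = len(polynomial) - 1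
--     result = []
--     for r in (3, 2, 1, 0):
--         total = 0
--         for i, coeff in enumerate(polynomial):
--             power = degree - i
--             if power % 4 == r:
--                 total += coeff if (power // 4) % 2 == 0 else -coeff
--         result.append(total)
--     return result
-- ===== Notes on version B (the rewrite author's own statement) =====
-- stated objective: alternative
-- what changed: B is output-driven: instead of A's single pass that updates a 4-slot accumulator by computed index and reverses it at the end, B builds each of the 4 output coefficients directly by scanning the polynomial once per residue class (power mod 4) and summing the coefficients with sign (-1)**(power//4), appending the slots already in output order.
import Mathlib
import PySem

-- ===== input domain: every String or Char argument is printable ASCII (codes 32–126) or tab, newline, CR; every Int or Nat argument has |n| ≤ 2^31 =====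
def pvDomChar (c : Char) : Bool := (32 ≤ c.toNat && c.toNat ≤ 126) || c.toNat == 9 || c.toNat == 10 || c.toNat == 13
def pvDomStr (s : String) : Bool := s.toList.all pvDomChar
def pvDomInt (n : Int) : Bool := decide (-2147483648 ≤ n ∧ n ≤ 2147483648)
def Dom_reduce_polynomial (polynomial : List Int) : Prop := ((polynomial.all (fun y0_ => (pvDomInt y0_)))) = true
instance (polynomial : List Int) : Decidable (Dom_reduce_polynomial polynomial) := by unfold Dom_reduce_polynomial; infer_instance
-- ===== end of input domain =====

-- B rebuilds each of the 4 output coefficients directly (one residue-class scan per slot,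
-- appended in output order) instead of A's single indexed-accumulator pass plus reversal.

-- ===== PORT A =====
-- loop body of A: index = (degree - i) % 4; reduced_poly[index] ±= coeff
def pvStepA (degree : Int) (acc : List Int) (ic : Int × Int) : List Int :=
  let index := PySem.Int.mod (degree - ic.1) 4
  if PySem.Int.mod (PySem.Int.floordiv (degree - ic.1) 4) 2 == 0 then
    acc.set index.toNat (acc.getD index.toNat 0 + ic.2)
  else
    acc.set index.toNat (acc.getD index.toNat 0 - ic.2)

def reduce_polynomial (polynomial : List Int) : List Int :=
  let degree : Int := (polynomial.length : Int) - 1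
  let reduced_poly := (PySem.List.enumerate polynomial).foldl (pvStepA degree) [0, 0, 0, 0]
  reduced_poly.reverse  -- xs[::-1]

-- ===== PORT B =====
-- inner loop of B: sum, over coefficients whose power ≡ r (mod 4), of ±coeff
def pvSumRes (degree : Int) (polynomial : List Int) (r : Int) : Int :=
  (PySem.List.enumerate polynomial).foldl (fun total ic =>
    let power := degree - ic.1
    if PySem.Int.mod power 4 == r then
      total + (if PySem.Int.mod (PySem.Int.floordiv power 4) 2 == 0 then ic.2 else -ic.2)
    else total) 0

def reduce_polynomial_alt (polynomial : List Int) : List Int :=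
  let degree : Int := (polynomial.length : Int) - 1
  [(3 : Int), 2, 1, 0].foldl (fun result r => result ++ [pvSumRes degree polynomial r]) []

-- ===== PRECONDITION & SPEC =====
def Spec_reduce_polynomial (polynomial : List Int) (out : List Int) : Prop := out = reduce_polynomial_alt polynomial
instance (polynomial : List Int) (out : List Int) : Decidable (Spec_reduce_polynomial polynomial out) := by unfold Spec_reduce_polynomial; infer_instance

-- ===== CLAIM (what is proved, stated in full; the proofs are below) =====
def Claim_equal_reduce_polynomial : Prop := ∀ (polynomial : List Int), Dom_reduce_polynomial polynomial → Spec_reduce_polynomial polynomial (reduce_polynomial polynomial)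

-- ===== LEMMAS AND PROOFS =====

-- contribution of one (index, coeff) pair to output slot r
def pvContrib (degree r : Int) (ic : Int × Int) : Int :=
  if PySem.Int.mod (degree - ic.1) 4 == r then
    (if PySem.Int.mod (PySem.Int.floordiv (degree - ic.1) 4) 2 == 0 then ic.2 else -ic.2)
  else 0

def pvS (degree r : Int) (l : List (Int × Int)) : Int := (l.map (pvContrib degree r)).sum

theorem pvSumRes_eq_S (degree r : Int) (l : List (Int × Int)) (i : Int) :
    l.foldl (fun total ic =>
      if PySem.Int.mod (degree - ic.1) 4 == r then
        total + (if PySem.Int.mod (PySem.Int.floordiv (degree - ic.1) 4) 2 == 0 then ic.2 else -ic.2)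
      else total) i = i + pvS degree r l := by
  induction l generalizing i with
  | nil => simp [pvS]
  | cons x xs ih =>
      simp only [List.foldl_cons, ih, pvS, List.map_cons, List.sum_cons, pvContrib]
      split_ifs <;> ring

theorem pvLoopA (degree : Int) (l : List (Int × Int)) :
    ∀ (a b c d : Int),
      l.foldl (pvStepA degree) [a, b, c, d] =
        [a + pvS degree 0 l, b + pvS degree 1 l, c + pvS degree 2 l, d + pvS degree 3 l] := by
  induction l with
  | nil => intro a b c d; simp [pvS]
  | cons x xs ih =>
      intro a b c d
      have hS : ∀ r, pvS degree r (x :: xs) = pvContrib degree r x + pvS degree r xs := by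
        intro r; simp [pvS]
      have h0 : (0 : Int) ≤ PySem.Int.mod (degree - x.1) 4 := PySem.Int.mod_nonneg _ (by norm_num)
      have h4 : PySem.Int.mod (degree - x.1) 4 < 4 := PySem.Int.mod_lt _ (by norm_num)
      have hm : PySem.Int.mod (degree - x.1) 4 = 0 ∨ PySem.Int.mod (degree - x.1) 4 = 1 ∨
          PySem.Int.mod (degree - x.1) 4 = 2 ∨ PySem.Int.mod (degree - x.1) 4 = 3 := by omega
      rcases hm with hm | hm | hm | hm <;>
        rcases he : (PySem.Int.mod (PySem.Int.floordiv (degree - x.1) 4) 2 == 0) with _ | _ <;>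
          · simp only [List.foldl_cons, pvStepA, hm, he]
            simp only [hS, pvContrib, hm, he]
            simp [ih]
            ring

theorem reduce_polynomial_spec : Claim_equal_reduce_polynomial := by
  unfold Claim_equal_reduce_polynomial
  intro polynomial _
  unfold Spec_reduce_polynomial reduce_polynomial reduce_polynomial_alt pvSumRes
  simp only [pvLoopA, pvSumRes_eq_S, List.foldl_cons, List.foldl_nil]
  simp
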